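-- pv_equiv track=rewrite | github.com/Ramora0/HexTicTacToe | learned_eval/analyze_patterns.py | extract_6_lines
-- ===== SOURCE A (Python) =====
-- HEX_DIRECTIONS = [(1, 0), (0, 1), (1, -1)]
--
-- WINDOW_LENGTH = 6
--
-- def extract_6_lines(board, current_player):
--     """Extract all canonical 6-cell line patterns from the board.
--
--     Returns set of canonical pattern tuples (after flip symmetry).
--     Each cell: 0=empty, 1=current_player, 2=opponent.
--     """
--     patterns = set()
--     occupied = set(board.keys())
--     if not occupied:
--         return patterns
--
--     checked = set()
--     for cq, cr in occupied:
--         for dq, dr in HEX_DIRECTIONS: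
--             for j in range(WINDOW_LENGTH):
--                 start_q = cq - j * dq
--                 start_r = cr - j * dr
--                 key = (start_q, start_r, dq, dr)
--                 if key in checked:
--                     continue
--                 checked.add(key)
--
--                 pat = []
--                 for i in range(WINDOW_LENGTH):
--                     cell = board.get((start_q + i * dq, start_r + i * dr))
--                     if cell is None:
--                         pat.append(0)
--                     elif cell == current_player:
--                         pat.append(1)
--                     else:
--                         pat.append(2)
--
--                 pat_tuple = tuple(pat)
--                 if all(c == 0 for c in pat_tuple):
--                     continue
--
--                 canon = min(pat_tuple, pat_tuple[::-1])
--                 patterns.add(canon)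
--
--     return patterns
-- ===== SOURCE B (Python) =====
-- HEX_DIRECTIONS = [(1, 0), (0, 1), (1, -1)]
--
-- WINDOW_LENGTH = 6
--
-- def extract_6_lines(board, current_player):
--     """Group occupied cells into lines per direction (r / q / q+r invariant),
--     slide 6-cell windows over each line's occupied indices."""
--     patterns = set()
--     for dq, dr in HEX_DIRECTIONS:
--         lines = {}
--         for q, r in board:
--             line, idx = (r, q) if dr == 0 else ((q, r) if dq == 0 else (q + r, q))
--             lines.setdefault(line, set()).add(idx)
--         for line, idxs in lines.items():
--             starts = {i - j for i in idxs for j in range(WINDOW_LENGTH)}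
--             for s in starts:
--                 if dr == 0:
--                     sq, sr = s, line
--                 elif dq == 0:
--                     sq, sr = line, s
--                 else:
--                     sq, sr = s, line - s
--                 cells = [board.get((sq + i * dq, sr + i * dr)) for i in range(WINDOW_LENGTH)]
--                 pat = tuple(0 if c is None else (1 if c == current_player else 2) for c in cells)
--                 if any(pat):
--                     patterns.add(min(pat, pat[::-1]))
--     return patterns
-- ===== Notes on version B (the rewrite author's own statement) =====
-- stated objective: alternative
-- what changed: Replaces A's per-cell anchor scan with a global checked-set deduplicating (start,direction) windows by a group-by data structure: cells are bucketed into lines per direction via the line invariant (r / q / q+r), and 6-cell windows slide over each line's deduplicated start indices.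
import Mathlib
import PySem

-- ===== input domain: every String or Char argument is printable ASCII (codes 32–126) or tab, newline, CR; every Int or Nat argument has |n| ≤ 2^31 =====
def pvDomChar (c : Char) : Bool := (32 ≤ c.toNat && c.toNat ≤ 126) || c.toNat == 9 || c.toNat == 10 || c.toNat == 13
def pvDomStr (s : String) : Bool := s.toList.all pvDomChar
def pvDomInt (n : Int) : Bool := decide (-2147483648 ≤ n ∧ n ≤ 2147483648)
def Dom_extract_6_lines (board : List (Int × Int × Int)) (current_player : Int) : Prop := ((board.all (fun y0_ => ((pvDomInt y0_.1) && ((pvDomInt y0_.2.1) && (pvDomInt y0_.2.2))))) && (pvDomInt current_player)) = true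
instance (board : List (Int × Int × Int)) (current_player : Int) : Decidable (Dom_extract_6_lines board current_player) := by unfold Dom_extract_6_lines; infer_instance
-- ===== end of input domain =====

-- B groups occupied cells into per-direction line buckets and slides 6-cell windows over each
-- line's start indices, instead of A's anchor scan deduplicated by a global checked set
-- (alternative decomposition, same cost). Both ports return the Python result set in
-- lexicographically sorted order (Python set iteration order is not modelled).

-- ===== PORT A =====
-- canonical (lexicographically sorted) list representation of a returned Python set of tuples
def pvSorted (xs : List (List Int)) : List (List Int) :=
  @PySem.List.sorted (List Int) (List Int) List.instLinearOrder.toLT LinearOrder.toDecidableLT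
    xs (fun x => x) false

def pvHexDirs : List (Int × Int) := [(1, 0), (0, 1), (1, -1)]

-- the board dict as an association list of ((q, r), value)
def pvDictOf (board : List (Int × Int × Int)) : PySem.Dict (Int × Int) Int :=
  PySem.Dict.mk (board.map (fun e => ((e.1, e.2.1), e.2.2)))

-- body of A's innermost loop (one anchor cell c, direction d, offset j); state = (patterns, checked)
def pvStepA (bd : PySem.Dict (Int × Int) Int) (cp : Int) (c : Int × Int) (d : Int × Int)
    (acc : PySem.Set (List Int) × PySem.Set (Int × Int × Int × Int)) (j : Int) :
    PySem.Set (List Int) × PySem.Set (Int × Int × Int × Int) :=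
  let start_q := c.1 - j * d.1
  let start_r := c.2 - j * d.2
  let key := (start_q, start_r, d.1, d.2)
  if PySem.Set.contains acc.2 key then acc
  else
    let checked := PySem.Set.add acc.2 key
    let pat := (PySem.List.pyRange 0 6 1).foldl (fun pat i =>
      pat ++ [match PySem.Dict.get? bd (start_q + i * d.1, start_r + i * d.2) with
              | none => (0 : Int)
              | some cell => if cell = cp then 1 else 2]) []
    if pat.all (fun c0 => c0 == 0) then (acc.1, checked)
    else (PySem.Set.add acc.1 (if pat.reverse < pat then pat.reverse else pat), checked)

def extract_6_lines (board : List (Int × Int × Int)) (current_player : Int) : List (List Int) :=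
  let bd := pvDictOf board
  let occupied : PySem.Set (Int × Int) := PySem.Set.ofList (board.map (fun e => (e.1, e.2.1)))
  if occupied = [] then []
  else
    let res := occupied.foldl (fun acc c =>
      pvHexDirs.foldl (fun acc d =>
        (PySem.List.pyRange 0 6 1).foldl (pvStepA bd current_player c d) acc) acc)
      (PySem.Set.empty, PySem.Set.empty)
    pvSorted res.1

-- ===== PORT B =====
-- (line, index) of a cell along direction d: lines of d = (1,0) share r, of (0,1) share q, of (1,-1) share q+r
def pvLineKey (d : Int × Int) (e : Int × Int × Int) : Int × Int :=
  if d.2 = 0 then (e.2.1, e.1) else if d.1 = 0 then (e.1, e.2.1) else (e.1 + e.2.1, e.1)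

-- lines = {}; for cell in board: lines.setdefault(line, set()).add(idx)
def pvLinesB (board : List (Int × Int × Int)) (d : Int × Int) : PySem.Dict Int (PySem.Set Int) :=
  board.foldl (fun ls e =>
    PySem.Dict.modify ls (pvLineKey d e).1 PySem.Set.empty
      (fun s => PySem.Set.add s (pvLineKey d e).2)) PySem.Dict.empty

-- starts = {i - j for i in idxs for j in range(WINDOW_LENGTH)}
def pvStarts (idxs : PySem.Set Int) : PySem.Set Int :=
  PySem.Set.ofList (idxs.flatMap (fun i => (PySem.List.pyRange 0 6 1).map (fun j => i - j)))

-- (sq, sr) of the window start on line `line` at along-line index s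
def pvStartCell (d : Int × Int) (line s : Int) : Int × Int :=
  if d.2 = 0 then (s, line) else if d.1 = 0 then (line, s) else (s, line - s)

-- body of B's innermost loop: build the window pattern at start s, add its canonical form
def pvStepB (bd : PySem.Dict (Int × Int) Int) (cp : Int) (d : Int × Int) (line : Int)
    (pats : PySem.Set (List Int)) (s : Int) : PySem.Set (List Int) :=
  let c0 := pvStartCell d line s
  let pat := (PySem.List.pyRange 0 6 1).map (fun i =>
    match PySem.Dict.get? bd (c0.1 + i * d.1, c0.2 + i * d.2) with
    | none => (0 : Int)
    | some cell => if cell = cp then 1 else 2)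
  if pat.any (fun c0 => !(c0 == 0)) then
    PySem.Set.add pats (if pat.reverse < pat then pat.reverse else pat)
  else pats

def extract_6_lines_alt (board : List (Int × Int × Int)) (current_player : Int) : List (List Int) :=
  let bd := pvDictOf board
  let patterns := pvHexDirs.foldl (fun pats d =>
    (pvLinesB board d).items.foldl (fun pats it =>
      (pvStarts it.2).foldl (pvStepB bd current_player d it.1) pats) pats) PySem.Set.empty
  pvSorted patterns

-- ===== PRECONDITION & SPEC =====
def Spec_extract_6_lines (board : List (Int × Int × Int)) (current_player : Int) (out : List (List Int)) : Prop := out = extract_6_lines_alt board current_player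
instance (board : List (Int × Int × Int)) (current_player : Int) (out : List (List Int)) : Decidable (Spec_extract_6_lines board current_player out) := by unfold Spec_extract_6_lines; infer_instance

-- ===== CLAIM (what is proved, stated in full; the proofs are below) =====
def Claim_equal_extract_6_lines : Prop := ∀ (board : List (Int × Int × Int)) (current_player : Int), Dom_extract_6_lines board current_player → Spec_extract_6_lines board current_player (extract_6_lines board current_player)

-- ===== LEMMAS AND PROOFS =====

-- the window key (start_q, start_r, dq, dr) anchored j steps before cell c in direction d
def pvKey (c d : Int × Int) (j : Int) : Int × Int × Int × Int :=
  (c.1 - j * d.1, c.2 - j * d.2, d.1, d.2)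

-- the 6-cell 0/1/2 pattern of the window k
def pvPatK (bd : PySem.Dict (Int × Int) Int) (cp : Int) (k : Int × Int × Int × Int) : List Int :=
  (PySem.List.pyRange 0 6 1).map (fun i =>
    match PySem.Dict.get? bd (k.1 + i * k.2.2.1, k.2.1 + i * k.2.2.2) with
    | none => (0 : Int)
    | some cell => if cell = cp then 1 else 2)

def pvCanon (pat : List Int) : List Int := if pat.reverse < pat then pat.reverse else pat

def pvNZ (pat : List Int) : Bool := pat.any (fun c0 => !(c0 == 0))

-- the common characterisation: p is the canonical pattern of some non-empty window
-- covering an occupied cell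
def pvGood (board : List (Int × Int × Int)) (cp : Int) (p : List Int) : Prop :=
  ∃ e ∈ board, ∃ d ∈ pvHexDirs, ∃ j : Int, (0 ≤ j ∧ j < 6) ∧
    pvNZ (pvPatK (pvDictOf board) cp (pvKey (e.1, e.2.1) d j)) = true ∧
    p = pvCanon (pvPatK (pvDictOf board) cp (pvKey (e.1, e.2.1) d j))

lemma pv_foldl_flatMap {α β γ : Type} (l : List α) (f : α → List β) (g : γ → β → γ) (i : γ) :
    (l.flatMap f).foldl g i = l.foldl (fun a x => (f x).foldl g a) i := by
  induction l generalizing i with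
  | nil => rfl
  | cons x xs ih => simp [List.foldl_append, ih]

lemma pv_all_eq_not_nz (pat : List Int) : pat.all (fun c0 => c0 == 0) = !pvNZ pat := by
  induction pat with
  | nil => rfl
  | cons x xs ih =>
    cases h : (x == 0) <;> simp only [pvNZ, List.all_cons, List.any_cons, h, Bool.false_and,
      Bool.true_and, Bool.not_false, Bool.not_true, Bool.true_or, Bool.false_or] <;>
      simpa [pvNZ] using ih

-- generic: a fold that conditionally Set.adds g w
lemma pv_mem_foldl_addIf {α : Type} (P : α → Bool) (g : α → List Int)
    (step : PySem.Set (List Int) → α → PySem.Set (List Int))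
    (hstep : ∀ pats w, step pats w = if P w then PySem.Set.add pats (g w) else pats) :
    ∀ (L : List α) (pats : List (List Int)), pats.Nodup →
      (L.foldl step pats).Nodup ∧
      (∀ p, p ∈ L.foldl step pats ↔ p ∈ pats ∨ ∃ w ∈ L, P w = true ∧ p = g w) := by
  intro L
  induction L with
  | nil => intro pats h; exact ⟨h, fun p => by simp⟩
  | cons w L ih =>
    intro pats h
    have hnext : (step pats w).Nodup := by
      rw [hstep]; split
      · exact PySem.Set.nodup_add _ _ h
      · exact h
    obtain ⟨h1, h2⟩ := ih (step pats w) hnext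
    refine ⟨by simpa using h1, fun p => ?_⟩
    rw [List.foldl_cons]
    rw [h2 p]
    have hmem : p ∈ step pats w ↔ p ∈ pats ∨ (P w = true ∧ p = g w) := by
      rw [hstep]
      by_cases hP : P w = true
      · simp [hP, PySem.Set.mem_add]
      · simp [hP]
    rw [hmem]
    constructor
    · rintro ((hp | hp) | ⟨w', hw', hp⟩)
      · exact Or.inl hp
      · exact Or.inr ⟨w, List.mem_cons_self .., hp⟩
      · exact Or.inr ⟨w', List.mem_cons_of_mem _ hw', hp⟩
    · rintro (hp | ⟨w', hw', hp⟩)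
      · exact Or.inl (Or.inl hp)
      · rcases List.mem_cons.1 hw' with rfl | hw'
        · exact Or.inl (Or.inr hp)
        · exact Or.inr ⟨w', hw', hp⟩

-- A's inner pattern loop is the window pattern
lemma pv_patA (bd : PySem.Dict (Int × Int) Int) (cp : Int) (c d : Int × Int) (j : Int) :
    ((PySem.List.pyRange 0 6 1).foldl (fun pat i =>
      pat ++ [match PySem.Dict.get? bd (c.1 - j * d.1 + i * d.1, c.2 - j * d.2 + i * d.2) with
              | none => (0 : Int)
              | some cell => if cell = cp then 1 else 2]) []) = pvPatK bd cp (pvKey c d j) := by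
  rw [PySem.List.foldl_append_singleton_eq_map]
  rfl

-- the invariant of A's fold: patterns collects the canonical nonzero patterns of the
-- windows whose keys are in checked
lemma pv_invA (bd : PySem.Dict (Int × Int) Int) (cp : Int) :
    ∀ (L : List ((Int × Int) × (Int × Int) × Int)) (pats : List (List Int))
      (chk : List (Int × Int × Int × Int)), pats.Nodup →
      (∀ k, k ∈ chk → pvNZ (pvPatK bd cp k) = true → pvCanon (pvPatK bd cp k) ∈ pats) →
      ((L.foldl (fun acc t => pvStepA bd cp t.1 t.2.1 acc t.2.2) (pats, chk)).1.Nodup ∧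
       ∀ p, p ∈ (L.foldl (fun acc t => pvStepA bd cp t.1 t.2.1 acc t.2.2) (pats, chk)).1 ↔
         p ∈ pats ∨ ∃ t ∈ L, pvNZ (pvPatK bd cp (pvKey t.1 t.2.1 t.2.2)) = true ∧
           p = pvCanon (pvPatK bd cp (pvKey t.1 t.2.1 t.2.2))) := by
  intro L
  induction L with
  | nil => intro pats chk h _; exact ⟨h, fun p => by simp⟩
  | cons t L ih =>
    intro pats chk h hchk
    obtain ⟨c, d, j⟩ := t
    rw [List.foldl_cons]
    have hstep : pvStepA bd cp c d (pats, chk) j =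
        if PySem.Set.contains chk (pvKey c d j) then (pats, chk)
        else if pvNZ (pvPatK bd cp (pvKey c d j)) = false then
          (pats, PySem.Set.add chk (pvKey c d j))
        else (PySem.Set.add pats (pvCanon (pvPatK bd cp (pvKey c d j))),
              PySem.Set.add chk (pvKey c d j)) := by
      show pvStepA bd cp c d (pats, chk) j = _
      rw [pvStepA]
      simp only [pv_patA bd cp c d j, pv_all_eq_not_nz, pvKey, pvCanon]
      cases hc : PySem.Set.contains chk (c.1 - j * d.1, c.2 - j * d.2, d.1, d.2) <;>
        cases hnz : pvNZ (pvPatK bd cp (c.1 - j * d.1, c.2 - j * d.2, d.1, d.2)) <;>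
          simp [hc, hnz]
    by_cases hc : PySem.Set.contains chk (pvKey c d j) = true
    · rw [hstep, if_pos hc]
      obtain ⟨h1, h2⟩ := ih pats chk h hchk
      refine ⟨h1, fun p => ?_⟩
      rw [h2 p]
      have hin : pvKey c d j ∈ chk := (PySem.Set.contains_iff _ _).1 hc
      constructor
      · rintro (hp | ⟨t', ht', hp⟩)
        · exact Or.inl hp
        · exact Or.inr ⟨t', List.mem_cons_of_mem _ ht', hp⟩
      · rintro (hp | ⟨t', ht', hp⟩)
        · exact Or.inl hp
        · rcases List.mem_cons.1 ht' with rfl | ht'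
          · exact Or.inl (hp.2 ▸ hchk _ hin hp.1)
          · exact Or.inr ⟨t', ht', hp⟩
    · rw [hstep, if_neg hc]
      by_cases hnz : pvNZ (pvPatK bd cp (pvKey c d j)) = true
      · rw [if_neg (by simp [hnz])]
        have hpn : (PySem.Set.add pats (pvCanon (pvPatK bd cp (pvKey c d j)))).Nodup :=
          PySem.Set.nodup_add _ _ h
        have hch : ∀ k, k ∈ PySem.Set.add chk (pvKey c d j) → pvNZ (pvPatK bd cp k) = true →
            pvCanon (pvPatK bd cp k) ∈ PySem.Set.add pats (pvCanon (pvPatK bd cp (pvKey c d j))) := by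
          intro k hk hkz
          rcases (PySem.Set.mem_add _ _ _).1 hk with hk | rfl
          · exact (PySem.Set.mem_add _ _ _).2 (Or.inl (hchk k hk hkz))
          · exact (PySem.Set.mem_add _ _ _).2 (Or.inr rfl)
        obtain ⟨h1, h2⟩ := ih _ _ hpn hch
        refine ⟨h1, fun p => ?_⟩
        rw [h2 p]
        constructor
        · rintro (hp | ⟨t', ht', hp⟩)
          · rcases (PySem.Set.mem_add _ _ _).1 hp with hp | rfl
            · exact Or.inl hp
            · exact Or.inr ⟨(c, d, j), List.mem_cons_self .., hnz, rfl⟩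
          · exact Or.inr ⟨t', List.mem_cons_of_mem _ ht', hp⟩
        · rintro (hp | ⟨t', ht', hp⟩)
          · exact Or.inl ((PySem.Set.mem_add _ _ _).2 (Or.inl hp))
          · rcases List.mem_cons.1 ht' with rfl | ht'
            · exact Or.inl ((PySem.Set.mem_add _ _ _).2 (Or.inr hp.2))
            · exact Or.inr ⟨t', ht', hp⟩
      · rw [if_pos (by simpa using hnz)]
        have hch : ∀ k, k ∈ PySem.Set.add chk (pvKey c d j) → pvNZ (pvPatK bd cp k) = true →
            pvCanon (pvPatK bd cp k) ∈ pats := by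
          intro k hk hkz
          rcases (PySem.Set.mem_add _ _ _).1 hk with hk | rfl
          · exact hchk k hk hkz
          · exact absurd hkz hnz
        obtain ⟨h1, h2⟩ := ih _ _ h hch
        refine ⟨h1, fun p => ?_⟩
        rw [h2 p]
        constructor
        · rintro (hp | ⟨t', ht', hp⟩)
          · exact Or.inl hp
          · exact Or.inr ⟨t', List.mem_cons_of_mem _ ht', hp⟩
        · rintro (hp | ⟨t', ht', hp⟩)
          · exact Or.inl hp
          · rcases List.mem_cons.1 ht' with rfl | ht'
            · exact absurd hp.1 hnz
            · exact Or.inr ⟨t', ht', hp⟩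

-- A's triple loop flattened
def pvTA (board : List (Int × Int × Int)) : List ((Int × Int) × (Int × Int) × Int) :=
  (PySem.Set.ofList (board.map (fun e => (e.1, e.2.1)))).flatMap (fun c =>
    pvHexDirs.flatMap (fun d => (PySem.List.pyRange 0 6 1).map (fun j => (c, d, j))))

def pvResA (board : List (Int × Int × Int)) (cp : Int) : List (List Int) :=
  ((pvTA board).foldl (fun acc t => pvStepA (pvDictOf board) cp t.1 t.2.1 acc t.2.2)
    (PySem.Set.empty, PySem.Set.empty)).1

lemma pv_A_eq (board : List (Int × Int × Int)) (cp : Int) :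
    extract_6_lines board cp =
      if (PySem.Set.ofList (board.map (fun e => (e.1, e.2.1))) : PySem.Set (Int × Int)) = [] then []
      else pvSorted (pvResA board cp) := by
  simp only [extract_6_lines, pvResA, pvTA, pv_foldl_flatMap, List.foldl_map]

lemma pv_memA (board : List (Int × Int × Int)) (cp : Int) :
    (pvResA board cp).Nodup ∧ ∀ p, p ∈ pvResA board cp ↔ pvGood board cp p := by
  obtain ⟨h1, h2⟩ := pv_invA (pvDictOf board) cp (pvTA board) [] [] List.nodup_nil (by simp)
  have hres : pvResA board cp =
      ((pvTA board).foldl (fun acc t => pvStepA (pvDictOf board) cp t.1 t.2.1 acc t.2.2)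
        ([], [])).1 := rfl
  rw [hres]
  refine ⟨h1, fun p => ?_⟩
  rw [h2 p]
  simp only [List.not_mem_nil, false_or]
  constructor
  · rintro ⟨t, ht, hnz, hp⟩
    simp only [pvTA, List.mem_flatMap, List.mem_map, PySem.Set.mem_ofList] at ht
    obtain ⟨c, hc, d, hd, j, hj, rfl⟩ := ht
    obtain ⟨e, he, rfl⟩ := hc
    rw [PySem.List.mem_pyRange_one] at hj
    exact ⟨e, he, d, hd, j, hj, hnz, hp⟩
  · rintro ⟨e, he, d, hd, j, hj, hnz, hp⟩
    refine ⟨((e.1, e.2.1), d, j), ?_, hnz, hp⟩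
    simp only [pvTA, List.mem_flatMap, List.mem_map, PySem.Set.mem_ofList]
    exact ⟨(e.1, e.2.1), ⟨e, he, rfl⟩, d, hd, j, PySem.List.mem_pyRange_one.2 hj, rfl⟩

-- ===== B side =====

lemma pv_linesB_getD_aux (d : Int × Int) (c : Int) :
    ∀ (l : List (Int × Int × Int)) (dct : PySem.Dict Int (PySem.Set Int)),
      (l.foldl (fun ls e =>
        PySem.Dict.modify ls (pvLineKey d e).1 PySem.Set.empty
          (fun s => PySem.Set.add s (pvLineKey d e).2)) dct).getD c PySem.Set.empty =
      PySem.Set.update (dct.getD c PySem.Set.empty)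
        ((l.filter (fun e => (pvLineKey d e).1 == c)).map (fun e => (pvLineKey d e).2)) := by
  intro l
  induction l with
  | nil => intro dct; rfl
  | cons e l ih =>
    intro dct
    rw [List.foldl_cons, ih]
    rw [PySem.Dict.getD_modify]
    by_cases hc : c = (pvLineKey d e).1
    · subst hc
      rw [if_pos rfl, List.filter_cons_of_pos (by simp)]
      rfl
    · rw [if_neg hc]
      rw [List.filter_cons_of_neg (by simp; exact fun h => hc h.symm)]

lemma pv_linesB_getD (board : List (Int × Int × Int)) (d : Int × Int) (c : Int) :
    (pvLinesB board d).getD c PySem.Set.empty =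
      PySem.Set.ofList ((board.filter (fun e => (pvLineKey d e).1 == c)).map
        (fun e => (pvLineKey d e).2)) := by
  rw [pvLinesB, pv_linesB_getD_aux]
  rfl

lemma pv_linesB_keys (board : List (Int × Int × Int)) (d : Int × Int) :
    (pvLinesB board d).keys = PySem.Set.ofList (board.map (fun e => (pvLineKey d e).1)) := by
  rw [pvLinesB]
  rw [PySem.Dict.keys_foldl_modify_key]
  rfl

lemma pv_linesB_keys_nodup (board : List (Int × Int × Int)) (d : Int × Int) :
    (pvLinesB board d).keys.Nodup := by
  rw [pv_linesB_keys]; exact PySem.Set.nodup_ofList _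

lemma pv_linesB_items (board : List (Int × Int × Int)) (d : Int × Int) :
    (pvLinesB board d).items =
      (pvLinesB board d).keys.map (fun k => (k, (pvLinesB board d).getD k PySem.Set.empty)) :=
  PySem.Dict.items_eq_map_keys _ (pv_linesB_keys_nodup board d) _

-- the window key that B's step at (d, line, s) reads
def pvKeyB (w : (Int × Int) × Int × Int) : Int × Int × Int × Int :=
  ((pvStartCell w.1 w.2.1 w.2.2).1, (pvStartCell w.1 w.2.1 w.2.2).2, w.1.1, w.1.2)

lemma pv_stepB_eq (bd : PySem.Dict (Int × Int) Int) (cp : Int) (w : (Int × Int) × Int × Int)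
    (pats : PySem.Set (List Int)) :
    pvStepB bd cp w.1 w.2.1 pats w.2.2 =
      if pvNZ (pvPatK bd cp (pvKeyB w)) = true then
        PySem.Set.add pats (pvCanon (pvPatK bd cp (pvKeyB w)))
      else pats := by
  rw [pvStepB]
  simp only [pvKeyB, pvPatK, pvNZ, pvCanon]

def pvWB (board : List (Int × Int × Int)) : List ((Int × Int) × Int × Int) :=
  pvHexDirs.flatMap (fun d => (pvLinesB board d).items.flatMap (fun it =>
    (pvStarts it.2).map (fun s => (d, it.1, s))))

def pvResB (board : List (Int × Int × Int)) (cp : Int) : List (List Int) :=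
  (pvWB board).foldl (fun pats w => pvStepB (pvDictOf board) cp w.1 w.2.1 pats w.2.2)
    PySem.Set.empty

lemma pv_B_eq (board : List (Int × Int × Int)) (cp : Int) :
    extract_6_lines_alt board cp = pvSorted (pvResB board cp) := by
  simp only [extract_6_lines_alt, pvResB, pvWB, pv_foldl_flatMap, List.foldl_map]

lemma pv_roundtrip (d : Int × Int) (hd : d ∈ pvHexDirs) (e : Int × Int × Int) (j : Int) :
    pvStartCell d (pvLineKey d e).1 ((pvLineKey d e).2 - j) = (e.1 - j * d.1, e.2.1 - j * d.2) := by
  simp only [pvHexDirs, List.mem_cons, List.not_mem_nil, or_false] at hd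
  rcases hd with rfl | rfl | rfl <;> simp [pvStartCell, pvLineKey]

lemma pv_memB (board : List (Int × Int × Int)) (cp : Int) :
    (pvResB board cp).Nodup ∧ ∀ p, p ∈ pvResB board cp ↔ pvGood board cp p := by
  obtain ⟨h1, h2⟩ := pv_mem_foldl_addIf
    (fun w => pvNZ (pvPatK (pvDictOf board) cp (pvKeyB w)))
    (fun w => pvCanon (pvPatK (pvDictOf board) cp (pvKeyB w)))
    (fun pats w => pvStepB (pvDictOf board) cp w.1 w.2.1 pats w.2.2)
    (fun pats w => pv_stepB_eq (pvDictOf board) cp w pats)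
    (pvWB board) [] List.nodup_nil
  have hres : pvResB board cp =
      (pvWB board).foldl (fun pats w => pvStepB (pvDictOf board) cp w.1 w.2.1 pats w.2.2) [] := rfl
  rw [hres]
  refine ⟨h1, fun p => ?_⟩
  rw [h2 p]
  simp only [List.not_mem_nil, false_or]
  have hmemW : ∀ w, w ∈ pvWB board ↔ ∃ d ∈ pvHexDirs, ∃ e ∈ board, ∃ j : Int,
      (0 ≤ j ∧ j < 6) ∧ w = (d, (pvLineKey d e).1, (pvLineKey d e).2 - j) := by
    intro w
    simp only [pvWB, List.mem_flatMap, List.mem_map]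
    constructor
    · rintro ⟨d, hd, it, hit, s, hs, rfl⟩
      rw [pv_linesB_items] at hit
      obtain ⟨k, hk, rfl⟩ := List.mem_map.1 hit
      simp only [pvStarts, PySem.Set.mem_ofList, List.mem_flatMap, List.mem_map] at hs
      obtain ⟨i, hi, j, hj, rfl⟩ := hs
      rw [pv_linesB_getD] at hi
      simp only [PySem.Set.mem_ofList, List.mem_map, List.mem_filter, beq_iff_eq] at hi
      obtain ⟨e, ⟨he, hek⟩, rfl⟩ := hi
      rw [PySem.List.mem_pyRange_one] at hj
      exact ⟨d, hd, e, he, j, hj, by rw [hek]⟩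
    · rintro ⟨d, hd, e, he, j, hj, rfl⟩
      refine ⟨d, hd, ((pvLineKey d e).1, (pvLinesB board d).getD (pvLineKey d e).1 PySem.Set.empty),
        ?_, (pvLineKey d e).2 - j, ?_, rfl⟩
      · rw [pv_linesB_items]
        refine List.mem_map.2 ⟨(pvLineKey d e).1, ?_, rfl⟩
        rw [pv_linesB_keys]
        exact (PySem.Set.mem_ofList _ _).2 (List.mem_map.2 ⟨e, he, rfl⟩)
      · simp only [pvStarts, PySem.Set.mem_ofList, List.mem_flatMap, List.mem_map]
        refine ⟨(pvLineKey d e).2, ?_, j, PySem.List.mem_pyRange_one.2 hj, rfl⟩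
        rw [pv_linesB_getD]
        simp only [PySem.Set.mem_ofList, List.mem_map, List.mem_filter, beq_iff_eq]
        exact ⟨e, ⟨he, rfl⟩, rfl⟩
  constructor
  · rintro ⟨w, hw, hnz, hp⟩
    obtain ⟨d, hd, e, he, j, hj, rfl⟩ := (hmemW w).1 hw
    have hkey : pvKeyB (d, (pvLineKey d e).1, (pvLineKey d e).2 - j) = pvKey (e.1, e.2.1) d j := by
      simp only [pvKeyB, pvKey]
      rw [show pvStartCell (d, (pvLineKey d e).1, (pvLineKey d e).2 - j).1
            (d, (pvLineKey d e).1, (pvLineKey d e).2 - j).2.1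
            (d, (pvLineKey d e).1, (pvLineKey d e).2 - j).2.2 =
          pvStartCell d (pvLineKey d e).1 ((pvLineKey d e).2 - j) from rfl,
        pv_roundtrip d hd e j]
    rw [hkey] at hnz hp
    exact ⟨e, he, d, hd, j, hj, hnz, hp⟩
  · rintro ⟨e, he, d, hd, j, hj, hnz, hp⟩
    refine ⟨(d, (pvLineKey d e).1, (pvLineKey d e).2 - j),
      (hmemW _).2 ⟨d, hd, e, he, j, hj, rfl⟩, ?_⟩
    have hkey : pvKeyB (d, (pvLineKey d e).1, (pvLineKey d e).2 - j) = pvKey (e.1, e.2.1) d j := by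
      simp only [pvKeyB, pvKey]
      rw [show pvStartCell (d, (pvLineKey d e).1, (pvLineKey d e).2 - j).1
            (d, (pvLineKey d e).1, (pvLineKey d e).2 - j).2.1
            (d, (pvLineKey d e).1, (pvLineKey d e).2 - j).2.2 =
          pvStartCell d (pvLineKey d e).1 ((pvLineKey d e).2 - j) from rfl,
        pv_roundtrip d hd e j]
    rw [hkey]
    exact ⟨hnz, hp⟩

lemma pv_sorted_congr (xs ys : List (List Int)) (h : xs.Perm ys) : pvSorted xs = pvSorted ys :=
  PySem.List.sorted_eq_sorted_of_perm xs ys (fun x => x) (fun a b hab => hab) h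

-- ===== VERDICT (by name: the statement is the Claim_ definition above) =====
theorem extract_6_lines_spec : Claim_equal_extract_6_lines := by
  unfold Claim_equal_extract_6_lines
  intro board cp _hdom
  unfold Spec_extract_6_lines
  rw [pv_A_eq, pv_B_eq]
  rcases board with _ | ⟨e, rest⟩
  · rfl
  · rw [if_neg (by
      intro hnil
      have : (e.1, e.2.1) ∈ (PySem.Set.ofList (((e :: rest)).map (fun e => (e.1, e.2.1))) : PySem.Set (Int × Int)) :=
        (PySem.Set.mem_ofList _ _).2 (List.mem_map.2 ⟨e, List.mem_cons_self .., rfl⟩)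
      rw [hnil] at this
      exact List.not_mem_nil this)]
    obtain ⟨hA1, hA2⟩ := pv_memA (e :: rest) cp
    obtain ⟨hB1, hB2⟩ := pv_memB (e :: rest) cp
    exact pv_sorted_congr _ _
      ((List.perm_ext_iff_of_nodup hA1 hB1).2 (fun p => (hA2 p).trans ((hB2 p).symm)))
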